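-- pv_equiv track=rewrite | github.com/ValdinePegy/Hello-World | proj07.py | history_of_country
-- ===== SOURCE A (Python) =====
-- from collections import Counter
--
-- REGIME=["Closed autocracy","Electoral autocracy","Electoral democracy","Liberal democracy"]
--
-- def history_of_country(country,country_names,list_of_regime_lists):
--     '''
--     This function figures out the dominant regime in a country by using the lists
--     we created.
--
--     Input: country, country_names, list_of_regime_lists(str, list of str, list of list of ints)
--
--     Returns : REGIME at index (str)
--
--     '''
--
--     idx_lst = [] #inititializing list to store indexes of most appearing regimes
--     n = list(Counter(list_of_regime_lists[country_names.index(country)]).keys())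
--     m = list(Counter(list_of_regime_lists[country_names.index(country)]).values())
--     e = zip(n,m) #pairing up the indexes of each regime with its count
--     mx = max(m)
--
--     for idx, count in e:
--         if (count == mx):
--             idx_lst.append(idx)
--
--     if (len(idx_lst) == 1): #creating condition for if only one regime has highest count
--         index = idx_lst[0]
--
--     else: #if more than one regime has highest count,the index for REGIME will be the minimum in idx_lst
--         index = min(idx_lst)
--     return REGIME[index]
-- ===== SOURCE B (Python) =====
-- REGIME = ["Closed autocracy", "Electoral autocracy", "Electoral democracy", "Liberal democracy"]
--
-- def history_of_country(country, country_names, list_of_regime_lists):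
--     regimes = list_of_regime_lists[country_names.index(country)]
--     dominant = max(sorted(set(regimes)), key=lambda v: (regimes.count(v), -v))
--     return REGIME[dominant]
-- ===== Notes on version B (the rewrite author's own statement) =====
-- stated objective: idiomatic
-- what changed: Replaces A's double Counter construction, keys/values zip, max-count collection loop and tie-break branch by one max() over the sorted distinct regime values with the composite key (count, -value).
import Mathlib
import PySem

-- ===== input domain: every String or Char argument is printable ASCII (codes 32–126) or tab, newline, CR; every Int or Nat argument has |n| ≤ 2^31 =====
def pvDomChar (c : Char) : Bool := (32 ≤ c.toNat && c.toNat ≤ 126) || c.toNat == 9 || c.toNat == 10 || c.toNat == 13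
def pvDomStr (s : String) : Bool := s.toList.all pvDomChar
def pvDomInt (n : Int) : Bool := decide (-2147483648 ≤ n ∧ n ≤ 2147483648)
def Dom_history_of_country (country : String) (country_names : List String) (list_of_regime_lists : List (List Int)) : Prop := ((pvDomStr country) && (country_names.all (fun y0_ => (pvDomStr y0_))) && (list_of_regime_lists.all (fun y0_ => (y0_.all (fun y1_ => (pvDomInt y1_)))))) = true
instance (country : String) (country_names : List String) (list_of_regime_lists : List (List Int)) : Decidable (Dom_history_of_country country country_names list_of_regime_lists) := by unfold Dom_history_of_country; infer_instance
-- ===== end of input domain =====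

-- B replaces A's Counter-keys/values zip, max-count collection loop and tie-break branch by a single
-- max() over the sorted distinct regime values with composite key (count, -value) — idiomatic, not faster.

-- shared module constant
def REGIME : List String := ["Closed autocracy", "Electoral autocracy", "Electoral democracy", "Liberal democracy"]

-- ===== PORT A =====
def history_of_country (country : String) (country_names : List String) (list_of_regime_lists : List (List Int)) : String :=
  let n := (PySem.Dict.counter ((PySem.List.pyGet? list_of_regime_lists (((PySem.List.index? country_names country).getD 0 : Nat) : Int)).getD [])).keys
  let m := (PySem.Dict.counter ((PySem.List.pyGet? list_of_regime_lists (((PySem.List.index? country_names country).getD 0 : Nat) : Int)).getD [])).values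
  let e := n.zip m
  let mx := (PySem.List.max? m (fun x => x)).getD 0
  let idx_lst := e.foldl (fun acc p => if p.2 == mx then acc ++ [p.1] else acc) ([] : List Int)
  let index := if idx_lst.length == 1 then (PySem.List.pyGet? idx_lst 0).getD 0
               else (PySem.List.min? idx_lst (fun x => x)).getD 0
  (PySem.List.pyGet? REGIME index).getD ""

-- ===== PORT B =====
def history_of_country_alt (country : String) (country_names : List String) (list_of_regime_lists : List (List Int)) : String :=
  let regimes := (PySem.List.pyGet? list_of_regime_lists (((PySem.List.index? country_names country).getD 0 : Nat) : Int)).getD []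
  let dominant := (PySem.List.max2? (PySem.List.sorted (PySem.Set.ofList regimes) (fun v => v) false)
                    (fun v => (regimes.count v : Int)) (fun v => -v)).getD 0
  (PySem.List.pyGet? REGIME dominant).getD ""

-- ===== PRECONDITION & SPEC =====
-- Pre_ holds exactly when the country occurs in country_names, its regime list exists, and the dominant
-- regime code (highest count, ties broken by the smallest code) is a valid Python index into REGIME
-- (-4...3): on exactly these inputs Python A returns; otherwise it raises ValueError or IndexError.
def Pre_history_of_country (country : String) (country_names : List String) (list_of_regime_lists : List (List Int)) : Prop :=
  (PySem.List.index? country_names country).isSome = true ∧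
  (PySem.List.index? country_names country).getD 0 < list_of_regime_lists.length ∧
  ∃ v ∈ list_of_regime_lists.getD ((PySem.List.index? country_names country).getD 0) [],
    (-4 ≤ v ∧ v ≤ 3) ∧
    ∀ w ∈ list_of_regime_lists.getD ((PySem.List.index? country_names country).getD 0) [],
      (list_of_regime_lists.getD ((PySem.List.index? country_names country).getD 0) []).count w <
        (list_of_regime_lists.getD ((PySem.List.index? country_names country).getD 0) []).count v ∨
      ((list_of_regime_lists.getD ((PySem.List.index? country_names country).getD 0) []).count w =
        (list_of_regime_lists.getD ((PySem.List.index? country_names country).getD 0) []).count v ∧ v ≤ w)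
instance (country : String) (country_names : List String) (list_of_regime_lists : List (List Int)) : Decidable (Pre_history_of_country country country_names list_of_regime_lists) := by unfold Pre_history_of_country; infer_instance

def pvWitness_history_of_country : String × List String × List (List Int) := ("cuba", ["cuba", "chile"], [[0, 0, 1], [3]])

def Spec_history_of_country (country : String) (country_names : List String) (list_of_regime_lists : List (List Int)) (out : String) : Prop := out = history_of_country_alt country country_names list_of_regime_lists
instance (country : String) (country_names : List String) (list_of_regime_lists : List (List Int)) (out : String) : Decidable (Spec_history_of_country country country_names list_of_regime_lists out) := by unfold Spec_history_of_country; infer_instance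

-- ===== CLAIM (what is proved, stated in full; the proofs are below) =====
def Claim_equal_history_of_country : Prop := ∀ (country : String) (country_names : List String) (list_of_regime_lists : List (List Int)), Dom_history_of_country country country_names list_of_regime_lists → Pre_history_of_country country country_names list_of_regime_lists → Spec_history_of_country country country_names list_of_regime_lists (history_of_country country country_names list_of_regime_lists)

-- ===== LEMMAS AND PROOFS =====

-- lex-maximum facts about PySem.List.max2? (no such lemmas exist in the prelude)
def pvStep {α : Type} (k1 k2 : α → Int) (acc : Option α) (x : α) : Option α :=
  match acc with
  | none => some x
  | some m => if (decide (k1 m < k1 x) || !decide (k1 x < k1 m) && decide (k2 m < k2 x)) = true then some x else some m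

theorem pv_max2_eq_foldl {α : Type} (k1 k2 : α → Int) (xs : List α) :
    PySem.List.max2? xs k1 k2 = xs.foldl (pvStep k1 k2) none := rfl

theorem pvStep_some_pos {α : Type} (k1 k2 : α → Int) (m x : α)
    (h : k1 m < k1 x ∨ (¬ k1 x < k1 m ∧ k2 m < k2 x)) : pvStep k1 k2 (some m) x = some x := by
  rcases h with h | ⟨h1, h2⟩
  · simp [pvStep, h]
  · simp [pvStep, h1, h2]

theorem pvStep_some_neg {α : Type} (k1 k2 : α → Int) (m x : α)
    (h : ¬ (k1 m < k1 x ∨ (¬ k1 x < k1 m ∧ k2 m < k2 x))) : pvStep k1 k2 (some m) x = some m := by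
  push_neg at h
  by_cases hx : k1 x < k1 m
  · simp [pvStep, asymm hx, hx]
  · simp [pvStep, not_lt.mpr h.1, hx, not_lt.mpr (h.2 (not_lt.mp hx))]

theorem pv_max2_foldl_some {α : Type} (k1 k2 : α → Int) (xs : List α) (m0 : α) :
    ∃ m, xs.foldl (pvStep k1 k2) (some m0) = some m ∧ (m = m0 ∨ m ∈ xs) ∧
      (k1 m0 < k1 m ∨ (k1 m0 = k1 m ∧ k2 m0 ≤ k2 m)) ∧
      (∀ y ∈ xs, k1 y < k1 m ∨ (k1 y = k1 m ∧ k2 y ≤ k2 m)) := by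
  induction xs generalizing m0 with
  | nil => exact ⟨m0, rfl, Or.inl rfl, Or.inr ⟨rfl, le_refl _⟩, by simp⟩
  | cons x t ih =>
    by_cases h : k1 m0 < k1 x ∨ (¬ k1 x < k1 m0 ∧ k2 m0 < k2 x)
    · obtain ⟨m, hm, hmem, hge, hall⟩ := ih x
      refine ⟨m, ?_, ?_, ?_, ?_⟩
      · rw [List.foldl_cons, pvStep_some_pos k1 k2 m0 x h]; exact hm
      · rcases hmem with rfl | hmem
        · exact Or.inr List.mem_cons_self
        · exact Or.inr (List.mem_cons_of_mem _ hmem)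
      · -- m0 <lex x ≤lex m
        rcases h with h | ⟨h1, h2⟩
        · rcases hge with hg | ⟨he, _⟩
          · exact Or.inl (lt_trans h hg)
          · exact Or.inl (he ▸ h)
        · rcases hge with hg | ⟨he, hk2⟩
          · exact Or.inl (lt_of_le_of_lt (le_of_not_gt h1) hg)
          · rcases lt_or_eq_of_le (le_of_not_gt h1) with hlt | heq
            · exact Or.inl (he ▸ hlt)
            · exact Or.inr ⟨heq.symm ▸ he, le_of_lt (lt_of_lt_of_le h2 hk2)⟩
      · intro y hy
        rcases List.mem_cons.mp hy with rfl | hy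
        · exact hge
        · exact hall y hy
    · obtain ⟨m, hm, hmem, hge, hall⟩ := ih m0
      refine ⟨m, ?_, ?_, hge, ?_⟩
      · rw [List.foldl_cons, pvStep_some_neg k1 k2 m0 x h]; exact hm
      · rcases hmem with rfl | hmem
        · exact Or.inl rfl
        · exact Or.inr (List.mem_cons_of_mem _ hmem)
      · intro y hy
        rcases List.mem_cons.mp hy with rfl | hy
        · -- y = x: x ≤lex m0 ≤lex m
          push_neg at h
          have hxm0 : k1 y < k1 m0 ∨ (k1 y = k1 m0 ∧ k2 y ≤ k2 m0) := by
            rcases lt_or_eq_of_le h.1 with hlt | heq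
            · exact Or.inl hlt
            · refine Or.inr ⟨heq, ?_⟩
              have := h.2 (le_of_eq heq.symm)
              omega
          rcases hxm0 with hlt | ⟨heq, hle⟩
          · rcases hge with hg | ⟨he, _⟩
            · exact Or.inl (lt_trans hlt hg)
            · exact Or.inl (he ▸ hlt)
          · rcases hge with hg | ⟨he, hk2⟩
            · exact Or.inl (heq ▸ hg)
            · exact Or.inr ⟨heq.trans he, le_trans hle hk2⟩
        · exact hall y hy

theorem pv_max2_spec {α : Type} (k1 k2 : α → Int) (x : α) (t : List α) :
    ∃ m, PySem.List.max2? (x :: t) k1 k2 = some m ∧ m ∈ x :: t ∧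
      ∀ y ∈ x :: t, k1 y < k1 m ∨ (k1 y = k1 m ∧ k2 y ≤ k2 m) := by
  obtain ⟨m, hm, hmem, hge, hall⟩ := pv_max2_foldl_some k1 k2 t x
  refine ⟨m, ?_, ?_, ?_⟩
  · rw [pv_max2_eq_foldl, List.foldl_cons]; exact hm
  · rcases hmem with rfl | hmem
    · exact List.mem_cons_self
    · exact List.mem_cons_of_mem _ hmem
  · intro y hy
    rcases List.mem_cons.mp hy with rfl | hy
    · rcases hge with hg | ⟨he, hk2⟩
      · exact Or.inl hg
      · exact Or.inr ⟨he, hk2⟩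
    · exact hall y hy

-- the heart of the matter: on a nonempty list, A's index computation equals B's
theorem pv_core (lst : List Int) (hne : lst ≠ [])
    (n m : List Int) (e : List (Int × Int)) (mx : Int) (idx_lst : List Int)
    (hn : n = (PySem.Dict.counter lst).keys)
    (hm : m = (PySem.Dict.counter lst).values)
    (he : e = n.zip m)
    (hmxd : mx = (PySem.List.max? m (fun x => x)).getD 0)
    (hidxd : idx_lst = e.foldl (fun acc p => if p.2 == mx then acc ++ [p.1] else acc) ([] : List Int)) :
    (if idx_lst.length == 1 then (PySem.List.pyGet? idx_lst 0).getD 0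
     else (PySem.List.min? idx_lst (fun x => x)).getD 0)
    = (PySem.List.max2? (PySem.List.sorted (PySem.Set.ofList lst) (fun v => v) false)
        (fun v => (lst.count v : Int)) (fun v => -v)).getD 0 := by
  set S : List Int := PySem.Set.ofList lst with hSdef
  set c : Int → Int := fun v => (lst.count v : Int) with hcdef
  have hSne : S ≠ [] := by
    cases lst with
    | nil => exact absurd rfl hne
    | cons a t =>
      exact List.ne_nil_of_mem ((PySem.Set.mem_ofList _ a).mpr List.mem_cons_self)
  have hnS : n = S := by rw [hn]; exact PySem.Dict.keys_counter lst
  have hmv : m = S.map c := by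
    rw [hm]
    simp [PySem.Dict.values, PySem.Dict.items_counter, hSdef, hcdef, Function.comp]
  have heS : e = S.map (fun k => (k, c k)) := by
    rw [he, hnS, hmv, show S = S.map id from (List.map_id S).symm, List.map_map, List.zip_map']
    simp
  -- the max of the counts
  have hmne : m ≠ [] := by rw [hmv]; simpa using hSne
  obtain ⟨mval, hmax⟩ : ∃ mv, PySem.List.max? m (fun x => x) = some mv := by
    cases hmm : PySem.List.max? m (fun x => x) with
    | none => exact absurd ((PySem.List.max?_eq_none_iff _ _).mp hmm) hmne
    | some mv => exact ⟨mv, rfl⟩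
  have hmx : mx = mval := by rw [hmxd, hmax]; rfl
  obtain ⟨k0, hk0S, hk0⟩ : ∃ k0 ∈ S, c k0 = mval := by
    have := PySem.List.max?_mem hmax
    rw [hmv] at this
    obtain ⟨k0, hk0S, hk0⟩ := List.mem_map.mp this
    exact ⟨k0, hk0S, hk0⟩
  have hmub : ∀ v ∈ S, c v ≤ mval := by
    intro v hv
    exact PySem.List.max?_isMax hmax (c v) (by rw [hmv]; exact List.mem_map_of_mem hv)
  -- A's candidate list is the filter of S by "count = mval"
  have hidx : idx_lst = S.filter (fun k => c k == mval) := by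
    rw [hidxd, heS, hmx, PySem.List.foldl_if_eq_foldl_filter, List.filter_map,
        PySem.List.foldl_append_singleton_eq_map]
    simp [Function.comp_def]
  have hidxne : idx_lst ≠ [] := by
    rw [hidx]
    exact List.ne_nil_of_mem (List.mem_filter.mpr ⟨hk0S, by simp [hk0]⟩)
  obtain ⟨amin, hamin⟩ : ∃ a, PySem.List.min? idx_lst (fun x => x) = some a := by
    cases hmm : PySem.List.min? idx_lst (fun x => x) with
    | none => exact absurd ((PySem.List.min?_eq_none_iff _ _).mp hmm) hidxne
    | some a => exact ⟨a, rfl⟩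
  -- A's index is amin in both branches
  have hA : (if idx_lst.length == 1 then (PySem.List.pyGet? idx_lst 0).getD 0
             else (PySem.List.min? idx_lst (fun x => x)).getD 0) = amin := by
    by_cases h1 : idx_lst.length = 1
    · obtain ⟨x, hx⟩ := List.length_eq_one_iff.mp h1
      have hmem : amin ∈ idx_lst := PySem.List.min?_mem hamin
      rw [hx] at hmem
      simp only [List.mem_singleton] at hmem
      simp [hx, hmem, PySem.List.pyGet?, PySem.List.pyIdx?]
    · simp [h1, hamin]
  rw [hA]
  -- amin's characterization
  have haminS : amin ∈ S ∧ c amin = mval := by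
    have hmem := PySem.List.min?_mem hamin
    rw [hidx] at hmem
    have := List.mem_filter.mp hmem
    exact ⟨this.1, by simpa using this.2⟩
  have haminmin : ∀ v ∈ S, c v = mval → amin ≤ v := by
    intro v hv hcv
    exact PySem.List.min?_isMin hamin v (by rw [hidx]; exact List.mem_filter.mpr ⟨hv, by simp [hcv]⟩)
  -- B's side
  have hvals : (PySem.List.sorted S (fun v => v) false).Perm S := PySem.List.sorted_perm S _ false
  obtain ⟨x, t, hxt⟩ : ∃ x t, PySem.List.sorted S (fun v => v) false = x :: t := by
    cases hs : PySem.List.sorted S (fun v => v) false with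
    | nil => exact absurd ((PySem.List.sorted_eq_nil_iff _ _ _).mp hs) hSne
    | cons x t => exact ⟨x, t, rfl⟩
  obtain ⟨b, hb, hbmem, hball⟩ := pv_max2_spec c (fun v => -v) x t
  have hbS : b ∈ S := hvals.mem_iff.mp (hxt ▸ hbmem)
  have hballS : ∀ y ∈ S, c y < c b ∨ (c y = c b ∧ -y ≤ -b) := by
    intro y hy
    exact hball y (hxt ▸ hvals.mem_iff.mpr hy)
  have hbdom : (PySem.List.max2? (PySem.List.sorted S (fun v => v) false) c (fun v => -v)).getD 0 = b := by
    rw [hxt, hb]; rfl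
  rw [hbdom]
  -- c b = mval, then antisymmetry
  have hcb : c b = mval := by
    have h1 : c b ≤ mval := hmub b hbS
    rcases hballS k0 hk0S with hlt | ⟨heq, _⟩ <;> omega
  have h1 : amin ≤ b := haminmin b hbS hcb
  have h2 : b ≤ amin := by
    rcases hballS amin haminS.1 with hlt | ⟨_, hle⟩ <;> omega
  omega

-- ===== VERDICT (by name: the statement is the Claim_ definition above) =====
theorem history_of_country_spec : Claim_equal_history_of_country := by
  intro country country_names list_of_regime_lists _hdom hpre
  obtain ⟨hsome, hlen, v, hv, _⟩ := hpre
  have hne : list_of_regime_lists.getD ((PySem.List.index? country_names country).getD 0) [] ≠ [] :=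
    List.ne_nil_of_mem hv
  unfold Spec_history_of_country
  simp only [history_of_country, history_of_country_alt]
  have hlst : (PySem.List.pyGet? list_of_regime_lists
      (((PySem.List.index? country_names country).getD 0 : Nat) : Int)).getD []
      = list_of_regime_lists.getD ((PySem.List.index? country_names country).getD 0) [] := by
    rw [PySem.List.pyGet?_natCast]
    rcases Nat.lt_or_ge ((PySem.List.index? country_names country).getD 0) list_of_regime_lists.length with h | h
    · simp [PySem.List.pyIdx?]
    · omega
  rw [hlst]
  rw [pv_core (list_of_regime_lists.getD ((PySem.List.index? country_names country).getD 0) []) hne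
      _ _ _ _ _ rfl rfl rfl rfl rfl]
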